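-- pv_equiv track=rewrite | github.com/MrBrantCode/unitest_baseline | mut_generate/mist_train_taco/taco_5636/solution.py | calculate_max_early_wakes
-- ===== SOURCE A (Python) =====
-- def calculate_max_early_wakes(N, sleep_wake_pairs):
--     x = []
--     num = 0
--
--     for a, b in sleep_wake_pairs:
--         x.append((num + a) % 86400)
--         num = (num + a + b) % 86400
--
--     x = sorted(x)
--     ans = 0
--
--     from bisect import bisect
--
--     for i in range(N):
--         ans = max(ans, bisect(x, x[i] + 10800) - i)
--         if x[i] <= 10800:
--             x.append(x[i] + 86400)
--
--     return ans
-- ===== SOURCE B (Python) =====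
-- def calculate_max_early_wakes(N, sleep_wake_pairs):
--     # unreduced prefix sums; reduce mod 86400 only once, inside the sort
--     pref = []
--     t = 0
--     for a, b in sleep_wake_pairs:
--         pref.append(t + a)
--         t += a + b
--     x = sorted(s % 86400 for s in pref)
--     # pre-materialise every wrap-around copy; the list stays sorted since copies exceed 86400
--     ext = x + [v + 86400 for v in x if v <= 10800]
--     ans = 0
--     j = 0
--     # one two-pointer sliding window instead of a binary search per index
--     for i in range(N):
--         bound = x[i] + 10800
--         while j < len(ext) and ext[j] <= bound:
--             j += 1
--         if j - i > ans:
--             ans = j - i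
--     return ans
-- ===== Notes on version B (the rewrite author's own statement) =====
-- stated objective: alternative
-- what changed: Replaces A's lazily-grown list with per-index bisect by a precomputed doubled sorted array (all wrap-around copies added up front) scanned once with a two-pointer sliding window, and reduces mod 86400 once at the sort instead of at every step of the prefix-sum loop.
-- outside the precondition, e.g. on calculate_max_early_wakes(2, [(0, 5)]): A returns 1, B raises IndexError
import Mathlib
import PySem

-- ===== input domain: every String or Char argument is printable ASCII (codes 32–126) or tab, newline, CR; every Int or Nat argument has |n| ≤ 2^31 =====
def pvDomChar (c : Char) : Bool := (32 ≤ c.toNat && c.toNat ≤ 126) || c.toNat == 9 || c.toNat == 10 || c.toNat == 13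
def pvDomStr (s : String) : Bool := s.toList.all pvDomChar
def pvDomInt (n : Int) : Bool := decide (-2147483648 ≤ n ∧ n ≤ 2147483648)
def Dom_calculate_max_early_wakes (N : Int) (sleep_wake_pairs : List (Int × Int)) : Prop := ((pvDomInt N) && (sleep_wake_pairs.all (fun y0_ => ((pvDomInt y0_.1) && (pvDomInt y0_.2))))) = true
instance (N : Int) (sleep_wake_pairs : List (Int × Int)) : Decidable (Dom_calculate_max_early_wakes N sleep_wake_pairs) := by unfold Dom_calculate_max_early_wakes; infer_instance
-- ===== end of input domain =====

-- B replaces A's lazily-grown sorted list + per-index bisect by a precomputed doubled array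
-- scanned with one two-pointer sliding window (alternative decomposition, same asymptotic cost).

-- ===== PORT A =====
-- loop body of A's 'for i in range(N)': x[i], bisect on the current list, conditional append
def pvStepA (st : Int × List Int) (i : Int) : Int × List Int :=
  let xi := PySem.List.pyGetD st.2 i 0
  let ans := max st.1 ((PySem.List.bisectRight st.2 (xi + 10800) : Int) - i)
  (ans, if xi ≤ 10800 then st.2 ++ [xi + 86400] else st.2)

def calculate_max_early_wakes (N : Int) (sleep_wake_pairs : List (Int × Int)) : Int :=
  -- x = []; num = 0; for a, b in pairs: x.append((num+a)%86400); num = (num+a+b)%86400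
  let st := sleep_wake_pairs.foldl
    (fun (st : List Int × Int) ab =>
      (st.1 ++ [PySem.Int.mod (st.2 + ab.1) 86400], PySem.Int.mod (st.2 + ab.1 + ab.2) 86400))
    ([], 0)
  let x := PySem.List.sorted st.1 (fun v => v) false
  let fin := (PySem.List.pyRange 0 N 1).foldl pvStepA (0, x)
  fin.1

-- ===== PORT B =====
-- 'while j < len(ext) and ext[j] <= bound: j += 1'  (j is Python's nonnegative counter, kept as Nat)
def pvAdvance (ext : List Int) (bound : Int) (j : Nat) : Nat :=
  if h : j < ext.length then
    if ext.getD j 0 ≤ bound then pvAdvance ext bound (j + 1) else j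
  else j
termination_by ext.length - j

-- loop body of B's 'for i in range(N)': slide j, take the window length if larger
def pvStepB (ext x : List Int) (st : Int × Nat) (i : Int) : Int × Nat :=
  let bound := PySem.List.pyGetD x i 0 + 10800
  let j := pvAdvance ext bound st.2
  (if (j : Int) - i > st.1 then (j : Int) - i else st.1, j)

def calculate_max_early_wakes_alt (N : Int) (sleep_wake_pairs : List (Int × Int)) : Int :=
  -- pref = []; t = 0; for a, b in pairs: pref.append(t+a); t += a+b
  let pr := sleep_wake_pairs.foldl
    (fun (st : List Int × Int) ab => (st.1 ++ [st.2 + ab.1], st.2 + ab.1 + ab.2)) ([], 0)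
  -- x = sorted(s % 86400 for s in pref)
  let x := PySem.List.sorted (pr.1.map (fun s => PySem.Int.mod s 86400)) (fun v => v) false
  -- ext = x + [v + 86400 for v in x if v <= 10800]
  let ext := x ++ (x.filter (fun v => decide (v ≤ 10800))).map (fun v => v + 86400)
  let fin := (PySem.List.pyRange 0 N 1).foldl (pvStepB ext x) (0, 0)
  fin.1

-- ===== PRECONDITION & SPEC =====
-- Pre_ excludes N > len(sleep_wake_pairs): there A's answer depends on its own lazily-appended
-- wrap-around copies (A sometimes still returns, sometimes raises IndexError), while B's
-- algorithm raises IndexError on x[i].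
def Pre_calculate_max_early_wakes (N : Int) (sleep_wake_pairs : List (Int × Int)) : Prop :=
  N ≤ (sleep_wake_pairs.length : Int)
instance (N : Int) (sleep_wake_pairs : List (Int × Int)) : Decidable (Pre_calculate_max_early_wakes N sleep_wake_pairs) := by unfold Pre_calculate_max_early_wakes; infer_instance

def pvWitness_calculate_max_early_wakes : Int × (List (Int × Int)) := (2, [(100, 200), (5000, 300)])

def Spec_calculate_max_early_wakes (N : Int) (sleep_wake_pairs : List (Int × Int)) (out : Int) : Prop := out = calculate_max_early_wakes_alt N sleep_wake_pairs
instance (N : Int) (sleep_wake_pairs : List (Int × Int)) (out : Int) : Decidable (Spec_calculate_max_early_wakes N sleep_wake_pairs out) := by unfold Spec_calculate_max_early_wakes; infer_instance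

-- ===== CLAIM (what is proved, stated in full; the proofs are below) =====
def Claim_equal_calculate_max_early_wakes : Prop := ∀ (N : Int) (sleep_wake_pairs : List (Int × Int)), Dom_calculate_max_early_wakes N sleep_wake_pairs → Pre_calculate_max_early_wakes N sleep_wake_pairs → Spec_calculate_max_early_wakes N sleep_wake_pairs (calculate_max_early_wakes N sleep_wake_pairs)

-- ===== LEMMAS AND PROOFS =====

-- the wrap-around copies contributed by the first m (sorted) wake times
def pvExtraOf (s : List Int) (m : Nat) : List Int :=
  ((s.take m).filter (fun v => decide (v ≤ 10800))).map (fun v => v + 86400)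

-- number of elements ≤ b
def pvCnt (l : List Int) (b : Int) : Nat := l.countP (fun u => decide (u ≤ b))

-- reducing mod 86400 at every step equals reducing once at the end
lemma pv_mod_add (t a : Int) :
    PySem.Int.mod (PySem.Int.mod t 86400 + a) 86400 = PySem.Int.mod (t + a) 86400 := by
  have h : (0:Int) < 86400 := by norm_num
  simp only [PySem.Int.mod_eq_emod_of_pos h]
  omega

-- A's prefix-sum loop produces exactly the mod-images of B's unreduced prefix sums
lemma pv_build_rel (pairs : List (Int × Int)) :
    ∀ (l : List Int) (t : Int),
      (pairs.foldl (fun (st : List Int × Int) ab =>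
          (st.1 ++ [PySem.Int.mod (st.2 + ab.1) 86400], PySem.Int.mod (st.2 + ab.1 + ab.2) 86400))
        (l.map (fun s => PySem.Int.mod s 86400), PySem.Int.mod t 86400)).1
      = ((pairs.foldl (fun (st : List Int × Int) ab =>
          (st.1 ++ [st.2 + ab.1], st.2 + ab.1 + ab.2)) (l, t)).1).map
          (fun s => PySem.Int.mod s 86400) := by
  induction pairs with
  | nil => intro l t; simp
  | cons ab rest ih =>
    intro l t
    simp only [List.foldl_cons]
    have h1 : PySem.Int.mod (PySem.Int.mod t 86400 + ab.1) 86400 = PySem.Int.mod (t + ab.1) 86400 :=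
      pv_mod_add t ab.1
    have h2 : PySem.Int.mod (PySem.Int.mod t 86400 + ab.1 + ab.2) 86400
        = PySem.Int.mod (t + ab.1 + ab.2) 86400 := by
      have := pv_mod_add t (ab.1 + ab.2)
      calc PySem.Int.mod (PySem.Int.mod t 86400 + ab.1 + ab.2) 86400
          = PySem.Int.mod (PySem.Int.mod t 86400 + (ab.1 + ab.2)) 86400 := by ring_nf
        _ = PySem.Int.mod (t + (ab.1 + ab.2)) 86400 := this
        _ = PySem.Int.mod (t + ab.1 + ab.2) 86400 := by ring_nf
    rw [h1, h2]
    have := ih (l ++ [t + ab.1]) (t + ab.1 + ab.2)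
    simpa using this

lemma pv_build_len (pairs : List (Int × Int)) :
    ∀ (l : List Int) (t : Int),
      ((pairs.foldl (fun (st : List Int × Int) ab =>
          (st.1 ++ [st.2 + ab.1], st.2 + ab.1 + ab.2)) (l, t)).1).length
        = l.length + pairs.length := by
  induction pairs with
  | nil => intro l t; simp
  | cons ab rest ih =>
    intro l t
    simp only [List.foldl_cons]
    rw [ih]
    simp; omega

-- on a sorted list, bisect_right b = the number of elements ≤ b
lemma pv_cnt_eq_bisect (xs : List Int) (v : Int) (hs : List.Pairwise (· ≤ ·) xs) :
    pvCnt xs v = PySem.List.bisectRight xs v := by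
  obtain ⟨hle, hpre, hpost⟩ := PySem.List.bisectRight_spec xs v hs
  set b := PySem.List.bisectRight xs v
  have hsplit : xs = xs.take b ++ xs.drop b := (List.take_append_drop b xs).symm
  have htake : (xs.take b).countP (fun u => decide (u ≤ v)) = b := by
    have hall : ∀ u ∈ xs.take b, (fun u => decide (u ≤ v)) u = true := by
      intro u hu
      obtain ⟨i, hi, hget⟩ := List.mem_iff_getElem.mp hu
      have hib : i < b := by
        have := hi; simp [List.length_take] at this; omega
      have hilen : i < xs.length := by
        have := hi; simp [List.length_take] at this; omega
      have : (xs.take b)[i] = xs[i] := List.getElem_take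
      rw [this] at hget
      subst hget
      simpa using hpre i hilen hib
    rw [List.countP_eq_length.mpr hall]
    simp [List.length_take]; omega
  have hdrop : (xs.drop b).countP (fun u => decide (u ≤ v)) = 0 := by
    apply List.countP_eq_zero.mpr
    intro u hu
    obtain ⟨i, hi, hget⟩ := List.mem_iff_getElem.mp hu
    have hilen : b + i < xs.length := by
      have := hi; simp [List.length_drop] at this; omega
    have : (xs.drop b)[i] = xs[b + i] := List.getElem_drop
    rw [this] at hget
    subst hget
    have := hpost (b + i) hilen (by omega)
    simp; omega
  unfold pvCnt
  rw [hsplit, List.countP_append, htake, hdrop]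
  omega

-- the two-pointer advance lands exactly on the count of elements ≤ bound
lemma pv_advance_eq (ext : List Int) (bound : Int) (hs : List.Pairwise (· ≤ ·) ext) :
    ∀ (j : Nat), j ≤ pvCnt ext bound → pvAdvance ext bound j = pvCnt ext bound := by
  obtain ⟨hle, hpre, hpost⟩ := PySem.List.bisectRight_spec ext bound hs
  have hcb : pvCnt ext bound = PySem.List.bisectRight ext bound := pv_cnt_eq_bisect ext bound hs
  intro j hj
  induction j using pvAdvance.induct ext bound with
  | case1 j hlt hget ih =>
    rw [pvAdvance, dif_pos hlt, if_pos hget]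
    rcases Nat.lt_or_ge j (pvCnt ext bound) with h | h
    · exact ih (by omega)
    · -- j = cnt; but then ext[j] > bound, contradiction with hget
      have hj' : j = pvCnt ext bound := by omega
      have := hpost j (by omega) (by omega)
      have hg : ext.getD j 0 = ext[j]'hlt := List.getD_eq_getElem ext 0 hlt
      rw [hg] at hget
      omega
  | case2 j hlt hget =>
    rw [pvAdvance, dif_pos hlt, if_neg hget]
    rcases Nat.lt_or_ge j (pvCnt ext bound) with h | h
    · exfalso
      have := hpre j (by omega) (by omega)
      have hg : ext.getD j 0 = ext[j]'hlt := List.getD_eq_getElem ext 0 hlt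
      rw [hg] at hget
      omega
    · omega
  | case3 j hlt =>
    rw [pvAdvance, dif_neg hlt]
    have : pvCnt ext bound ≤ ext.length := by
      unfold pvCnt; exact List.countP_le_length
    omega

-- every element from index m on is ≥ the element at m (sorted list)
lemma pv_sorted_drop_ge (s : List Int) (hs : List.Pairwise (· ≤ ·) s) (m : Nat)
    (hm : m < s.length) : ∀ v ∈ s.drop m, s[m] ≤ v := by
  intro v hv
  obtain ⟨i, hi, hget⟩ := List.mem_iff_getElem.mp hv
  have hilen : m + i < s.length := by
    have := hi; simp [List.length_drop] at this; omega
  have hg : (s.drop m)[i] = s[m + i] := List.getElem_drop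
  rw [hg] at hget
  subst hget
  rcases Nat.eq_zero_or_pos i with h0 | h0
  · subst h0; simp
  · exact List.pairwise_iff_getElem.mp hs m (m + i) hm hilen (by omega)

-- the current A-list s ++ pvExtraOf s m is sorted
lemma pv_cur_sorted (s : List Int) (hs : List.Pairwise (· ≤ ·) s)
    (hb : ∀ v ∈ s, 0 ≤ v ∧ v < 86400) (m : Nat) :
    List.Pairwise (· ≤ ·) (s ++ pvExtraOf s m) := by
  rw [List.pairwise_append]
  refine ⟨hs, ?_, ?_⟩
  · unfold pvExtraOf
    rw [List.pairwise_map]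
    have h1 : List.Pairwise (· ≤ ·) ((s.take m).filter (fun v => decide (v ≤ 10800))) :=
      List.Pairwise.sublist (List.Sublist.trans List.filter_sublist (List.take_sublist m s)) hs
    exact h1.imp (by intro a b h; omega)
  · intro u hu w hw
    unfold pvExtraOf at hw
    obtain ⟨v, hv, rfl⟩ := List.mem_map.mp hw
    have hvs : v ∈ s := (List.take_sublist m s).mem (List.mem_of_mem_filter hv)
    have h1 := hb u hu
    have h2 := hb v hvs
    omega

-- counting ≤ s[m]+10800 ignores wrap copies of indices ≥ m
lemma pv_cnt_ext (s : List Int) (hs : List.Pairwise (· ≤ ·) s)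
    (m : Nat) (hm : m < s.length) :
    pvCnt (s ++ pvExtraOf s m) (s[m] + 10800)
      = pvCnt (s ++ (s.filter (fun v => decide (v ≤ 10800))).map (fun v => v + 86400))
          (s[m] + 10800) := by
  have hsplit : s.filter (fun v => decide (v ≤ 10800))
      = (s.take m).filter (fun v => decide (v ≤ 10800))
        ++ (s.drop m).filter (fun v => decide (v ≤ 10800)) := by
    rw [← List.filter_append, List.take_append_drop]
  unfold pvCnt pvExtraOf
  rw [hsplit, List.map_append]
  simp only [List.countP_append]
  have hzero : (((s.drop m).filter (fun v => decide (v ≤ 10800))).map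
      (fun v => v + 86400)).countP (fun u => decide (u ≤ s[m] + 10800)) = 0 := by
    apply List.countP_eq_zero.mpr
    intro u hu
    obtain ⟨v, hv, rfl⟩ := List.mem_map.mp hu
    have hvd : v ∈ s.drop m := List.mem_of_mem_filter hv
    have := pv_sorted_drop_ge s hs m hm v hvd
    simp; omega
  omega

-- the two main loops agree step by step
lemma pv_loop_eq (s : List Int) (hs : List.Pairwise (· ≤ ·) s)
    (hb : ∀ v ∈ s, 0 ≤ v ∧ v < 86400) :
    ∀ (k : Nat) (a n ans : Int) (j : Nat) (hk : k = (n - a).toNat) (ha : 0 ≤ a)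
      (hn : n ≤ (s.length : Int))
      (hj : ∀ (h : a < n), j ≤ pvCnt (s ++ (s.filter (fun v => decide (v ≤ 10800))).map (fun v => v + 86400))
          (s[a.toNat]'(by omega) + 10800)),
      ((PySem.List.pyRange a n 1).foldl pvStepA (ans, s ++ pvExtraOf s a.toNat)).1
        = ((PySem.List.pyRange a n 1).foldl
            (pvStepB (s ++ (s.filter (fun v => decide (v ≤ 10800))).map (fun v => v + 86400)) s)
            (ans, j)).1 := by
  intro k
  induction k with
  | zero =>
    intro a n ans j hk ha hn hj
    rw [PySem.List.pyRange_one_eq_nil (by omega)]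
    simp
  | succ k ih =>
    intro a n ans j hk ha hn hj
    by_cases hlt : a < n
    · have halen : a.toNat < s.length := by omega
      set ext := s ++ (s.filter (fun v => decide (v ≤ 10800))).map (fun v => v + 86400) with hext
      have hexts : List.Pairwise (· ≤ ·) ext := by
        have h := pv_cur_sorted s hs hb s.length
        unfold pvExtraOf at h
        rwa [List.take_length] at h
      rw [PySem.List.pyRange_one_cons hlt]
      simp only [List.foldl_cons]
      -- the A step
      have hxi : PySem.List.pyGetD (s ++ pvExtraOf s a.toNat) a 0 = s[a.toNat]'halen := by
        rw [PySem.List.pyGetD_eq_getElem _ _ ha (by simp [pvExtraOf]; omega)]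
        exact List.getElem_append_left halen
      have hxs : PySem.List.pyGetD s a 0 = s[a.toNat]'halen :=
        PySem.List.pyGetD_eq_getElem _ _ ha (by omega)
      have hcur : List.Pairwise (· ≤ ·) (s ++ pvExtraOf s a.toNat) :=
        pv_cur_sorted s hs hb a.toNat
      have hbisect : PySem.List.bisectRight (s ++ pvExtraOf s a.toNat) (s[a.toNat]'halen + 10800)
          = pvCnt ext (s[a.toNat]'halen + 10800) := by
        rw [← pv_cnt_eq_bisect _ _ hcur, pv_cnt_ext s hs a.toNat halen]
      have hadv : pvAdvance ext (s[a.toNat]'halen + 10800) j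
          = pvCnt ext (s[a.toNat]'halen + 10800) :=
        pv_advance_eq ext _ hexts j (hj hlt)
      have hstepA : pvStepA (ans, s ++ pvExtraOf s a.toNat) a
          = (max ans ((pvCnt ext (s[a.toNat]'halen + 10800) : Int) - a),
             s ++ pvExtraOf s (a + 1).toNat) := by
        unfold pvStepA
        simp only [hxi, hbisect]
        congr 1
        have hto : (a + 1).toNat = a.toNat + 1 := by omega
        have hext1 : pvExtraOf s (a.toNat + 1)
            = pvExtraOf s a.toNat
              ++ (if s[a.toNat]'halen ≤ 10800 then [s[a.toNat]'halen + 86400] else []) := by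
          unfold pvExtraOf
          rw [List.take_add_one, List.getElem?_eq_getElem halen]
          simp only [Option.toList_some, List.filter_append, List.map_append]
          congr 1
          by_cases hc : s[a.toNat]'halen ≤ 10800 <;> simp [hc]
        rw [hto, hext1]
        by_cases hc : s[a.toNat]'halen ≤ 10800 <;> simp [hc]
      have hstepB : pvStepB ext s (ans, j) a
          = (max ans ((pvCnt ext (s[a.toNat]'halen + 10800) : Int) - a),
             pvCnt ext (s[a.toNat]'halen + 10800)) := by
        unfold pvStepB
        simp only [hxs, hadv]
        congr 1
        rw [max_def]
        split_ifs <;> omega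
      rw [hstepA, hstepB]
      apply ih (a + 1) n _ _ (by omega) (by omega) hn
      intro h1
      have h1len : a.toNat + 1 < s.length := by omega
      have hto : (a + 1).toNat = a.toNat + 1 := by omega
      have hmono : s[a.toNat]'halen ≤ s[(a + 1).toNat]'(by omega) := by
        simp only [hto]
        exact List.pairwise_iff_getElem.mp hs a.toNat (a.toNat + 1) halen h1len (by omega)
      unfold pvCnt
      apply List.countP_mono_left
      intro x hx h
      simp at h ⊢
      omega
    · rw [PySem.List.pyRange_one_eq_nil (by omega)]
      simp

theorem calculate_max_early_wakes_spec : Claim_equal_calculate_max_early_wakes := by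
  intro N pairs hdom hpre
  unfold Pre_calculate_max_early_wakes at hpre
  unfold Spec_calculate_max_early_wakes calculate_max_early_wakes calculate_max_early_wakes_alt
  dsimp only
  have hrel := pv_build_rel pairs [] 0
  have hm0 : PySem.Int.mod (0 : Int) 86400 = 0 := by decide
  simp only [List.map_nil, hm0] at hrel
  set stB := pairs.foldl
    (fun (st : List Int × Int) ab => (st.1 ++ [st.2 + ab.1], st.2 + ab.1 + ab.2)) ([], 0) with hstB
  set s := PySem.List.sorted ((stB.1).map (fun s => PySem.Int.mod s 86400)) (fun v => v) false
    with hsdef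
  have hs : List.Pairwise (· ≤ ·) s := PySem.List.sorted_pairwise _ _
  have hb : ∀ v ∈ s, 0 ≤ v ∧ v < 86400 := by
    intro v hv
    have hv' := (PySem.List.mem_sorted _ _ _ _).mp hv
    obtain ⟨u, _, rfl⟩ := List.mem_map.mp hv'
    exact ⟨PySem.Int.mod_nonneg u (by norm_num), PySem.Int.mod_lt u (by norm_num)⟩
  have hslen : s.length = pairs.length := by
    rw [hsdef, PySem.List.length_sorted, List.length_map, hstB, pv_build_len pairs [] 0]
    simp
  have hlen : N ≤ (s.length : Int) := by rw [hslen]; exact hpre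
  have hmain := pv_loop_eq s hs hb N.toNat 0 N 0 0 (by omega) (by omega) hlen
    (fun _ => Nat.zero_le _)
  have h0 : pvExtraOf s (0 : Int).toNat = [] := by simp [pvExtraOf]
  rw [h0, List.append_nil] at hmain
  rw [hrel]
  exact hmain
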